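-- pv_equiv track=rewrite | github.com/kneelinghorse/agent-vitals-bench | elicitation/elicit_thrash.py | _objectives_oscillate
-- ===== SOURCE A (Python) =====
-- def _objectives_oscillate(objectives_seq: list[int]) -> bool:
--     """Check if objectives_covered has at least one increase-then-decrease."""
--     if len(objectives_seq) < 3:
--         return False
--     saw_increase = False
--     for i in range(1, len(objectives_seq)):
--         if objectives_seq[i] > objectives_seq[i - 1]:
--             saw_increase = True
--         elif objectives_seq[i] < objectives_seq[i - 1] and saw_increase:
--             return True
--     return False
-- ===== SOURCE B (Python) =====
-- def _objectives_oscillate(objectives_seq: list[int]) -> bool: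
--     """Check if objectives_covered has at least one increase-then-decrease."""
--     signs = [(b > a) - (b < a) for a, b in zip(objectives_seq, objectives_seq[1:])]
--     moves = [s for s in signs if s]
--     return any(x == 1 and y == -1 for x, y in zip(moves, moves[1:]))
-- ===== Notes on version B (the rewrite author's own statement) =====
-- stated objective: alternative
-- what changed: Replaces A's index loop carrying a saw_increase flag with early return by a data pipeline: map adjacent pairs to step signs, filter out zeros, and test whether a rise sign is immediately followed by a fall sign in the resulting move list.
import Mathlib
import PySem

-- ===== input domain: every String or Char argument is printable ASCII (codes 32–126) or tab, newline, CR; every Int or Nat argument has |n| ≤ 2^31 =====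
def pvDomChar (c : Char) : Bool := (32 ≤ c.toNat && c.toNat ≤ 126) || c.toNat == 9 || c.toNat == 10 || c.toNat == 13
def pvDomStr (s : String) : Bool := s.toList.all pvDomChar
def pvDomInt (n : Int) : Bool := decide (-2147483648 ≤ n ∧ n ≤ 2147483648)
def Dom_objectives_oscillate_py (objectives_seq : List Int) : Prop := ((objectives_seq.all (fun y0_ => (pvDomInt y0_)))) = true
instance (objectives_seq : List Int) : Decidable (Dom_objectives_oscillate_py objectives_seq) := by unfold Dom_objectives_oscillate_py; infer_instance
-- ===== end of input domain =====

-- B replaces A's flag-carrying index loop by a pipeline: step signs -> drop zeros -> adjacent rise-then-fall pair (alternative decomposition, same cost).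

-- ===== PORT A =====
-- A's loop over range(1, len) with the saw_increase flag and the early 'return True'.
def pvLoopA (seq : List Int) (idxs : List Int) (saw : Bool) : Bool :=
  match idxs with
  | [] => false
  | i :: rest =>
    if PySem.List.pyGetD seq i 0 > PySem.List.pyGetD seq (i - 1) 0 then
      pvLoopA seq rest true
    else if PySem.List.pyGetD seq i 0 < PySem.List.pyGetD seq (i - 1) 0 && saw then
      true
    else
      pvLoopA seq rest saw

def objectives_oscillate_py (objectives_seq : List Int) : Bool :=
  if (objectives_seq.length : Int) < 3 then false
  else pvLoopA objectives_seq (PySem.List.pyRange 1 (objectives_seq.length : Int) 1) false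

-- ===== PORT B =====
-- signs = [(b > a) - (b < a) for a, b in zip(seq, seq[1:])]; moves = [s for s in signs if s];
-- any(x == 1 and y == -1 for x, y in zip(moves, moves[1:]))
def objectives_oscillate_py_alt (objectives_seq : List Int) : Bool :=
  let signs := (objectives_seq.zip (objectives_seq.drop 1)).map
      (fun p => (if p.2 > p.1 then (1 : Int) else 0) - (if p.2 < p.1 then 1 else 0))
  let moves := signs.filter (fun s => s != 0)
  (moves.zip (moves.drop 1)).any (fun p => p.1 == 1 && p.2 == -1)

-- ===== PRECONDITION & SPEC =====
def Spec_objectives_oscillate_py (objectives_seq : List Int) (out : Bool) : Prop := out = objectives_oscillate_py_alt objectives_seq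
instance (objectives_seq : List Int) (out : Bool) : Decidable (Spec_objectives_oscillate_py objectives_seq out) := by unfold Spec_objectives_oscillate_py; infer_instance

-- ===== CLAIM (what is proved, stated in full; the proofs are below) =====
def Claim_equal_objectives_oscillate_py : Prop := ∀ (objectives_seq : List Int), Dom_objectives_oscillate_py objectives_seq → Spec_objectives_oscillate_py objectives_seq (objectives_oscillate_py objectives_seq)

-- ===== LEMMAS AND PROOFS =====

-- A's loop re-expressed structurally over the adjacent pairs of the sequence
def pvLoopP (L : List (Int × Int)) (saw : Bool) : Bool :=
  match L with
  | [] => false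
  | p :: rest =>
    if p.2 > p.1 then pvLoopP rest true
    else if p.2 < p.1 && saw then true
    else pvLoopP rest saw

-- B's pipeline pieces, named for the proofs (same lambdas as in the port)
def pvMoves (L : List (Int × Int)) : List Int :=
  (L.map (fun p => (if p.2 > p.1 then (1 : Int) else 0) - (if p.2 < p.1 then 1 else 0))).filter
    (fun s => s != 0)

def pvAdj (ms : List Int) : Bool :=
  (ms.zip (ms.drop 1)).any (fun p => p.1 == 1 && p.2 == -1)

theorem pvMoves_cons_pos (p : Int × Int) (rest : List (Int × Int)) (h : p.2 > p.1) :
    pvMoves (p :: rest) = 1 :: pvMoves rest := by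
  have h2 : ¬ p.2 < p.1 := by omega
  simp [pvMoves, h, h2]

theorem pvMoves_cons_neg (p : Int × Int) (rest : List (Int × Int)) (h : p.2 < p.1) :
    pvMoves (p :: rest) = (-1) :: pvMoves rest := by
  have h2 : ¬ p.2 > p.1 := by omega
  simp [pvMoves, h, h2]

theorem pvMoves_cons_eq (p : Int × Int) (rest : List (Int × Int))
    (h1 : ¬ p.2 > p.1) (h2 : ¬ p.2 < p.1) : pvMoves (p :: rest) = pvMoves rest := by
  simp [pvMoves, h1, h2]

theorem pvMoves_all (L : List (Int × Int)) : ∀ x ∈ pvMoves L, x = 1 ∨ x = -1 := by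
  intro x hx
  simp only [pvMoves, List.mem_filter, List.mem_map] at hx
  obtain ⟨⟨p, _, hp⟩, hne⟩ := hx
  subst hp
  simp only [bne_iff_ne, ne_eq] at hne
  split_ifs at hne <;> omega

theorem pvAdj_cons (x y : Int) (t : List Int) :
    pvAdj (x :: y :: t) = ((x == 1 && y == -1) || pvAdj (y :: t)) := by
  simp [pvAdj]

theorem pvAdj_one (ms : List Int) (h : ∀ x ∈ ms, x = 1 ∨ x = -1) :
    pvAdj (1 :: ms) = ms.contains (-1) := by
  induction ms with
  | nil => rfl
  | cons x t ih =>
    rw [pvAdj_cons]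
    rcases h x (List.mem_cons_self) with hx | hx
    · subst hx
      rw [ih (fun y hy => h y (List.mem_cons_of_mem _ hy))]
      simp
    · subst hx
      simp

theorem pvAdj_negone (ms : List Int) : pvAdj ((-1) :: ms) = pvAdj ms := by
  cases ms with
  | nil => rfl
  | cons y t => rw [pvAdj_cons]; simp

theorem pvAdj_short (ms : List Int) (h : ms.length ≤ 1) : pvAdj ms = false := by
  cases ms with
  | nil => rfl
  | cons x t =>
    cases t with
    | nil => rfl
    | cons y u => simp at h

theorem pvMoves_contains_negone (L : List (Int × Int)) :
    (pvMoves L).contains (-1) = L.any (fun p => p.2 < p.1) := by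
  induction L with
  | nil => rfl
  | cons p rest ih =>
    by_cases hlt : p.2 < p.1
    · rw [pvMoves_cons_neg p rest hlt]
      simp [hlt]
    · by_cases hgt : p.2 > p.1
      · rw [pvMoves_cons_pos p rest hgt, List.contains_cons, ih]
        simp [hlt]
      · rw [pvMoves_cons_eq p rest hgt hlt, ih]
        simp [hlt]

theorem pvLoopP_true (L : List (Int × Int)) :
    pvLoopP L true = L.any (fun p => p.2 < p.1) := by
  induction L with
  | nil => rfl
  | cons p rest ih =>
    rw [pvLoopP, List.any_cons]
    by_cases hgt : p.2 > p.1
    · rw [if_pos hgt, ih]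
      have : decide (p.2 < p.1) = false := by simp; omega
      simp [this]
    · rw [if_neg hgt]
      by_cases hlt : p.2 < p.1
      · simp [hlt]
      · simp [hlt, ih]

theorem pvLoopP_false (L : List (Int × Int)) :
    pvLoopP L false = pvAdj (pvMoves L) := by
  induction L with
  | nil => rfl
  | cons p rest ih =>
    rw [pvLoopP]
    by_cases hgt : p.2 > p.1
    · rw [if_pos hgt, pvMoves_cons_pos p rest hgt, pvLoopP_true,
          pvAdj_one _ (pvMoves_all rest), pvMoves_contains_negone]
    · rw [if_neg hgt,
          show (decide (p.2 < p.1) && false) = false from Bool.and_false _,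
          if_neg Bool.false_ne_true]
      by_cases hlt : p.2 < p.1
      · rw [pvMoves_cons_neg p rest hlt, pvAdj_negone]
        exact ih
      · rw [pvMoves_cons_eq p rest hgt hlt]
        exact ih

-- A's index loop from k equals the pair loop on the suffix of adjacent pairs
theorem pvLoopA_eq_loopP (seq : List Int) :
    ∀ (m k : Nat) (saw : Bool), 1 ≤ k → seq.length - k ≤ m →
    pvLoopA seq (PySem.List.pyRange (k : Int) (seq.length : Int) 1) saw =
      pvLoopP ((seq.drop (k - 1)).zip (seq.drop k)) saw := by
  intro m
  induction m with
  | zero =>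
    intro k saw hk hm
    rw [PySem.List.pyRange_one_eq_nil (by omega : (seq.length : Int) ≤ (k : Int))]
    rw [List.drop_eq_nil_of_le (by omega : seq.length ≤ k)]
    simp [pvLoopA, pvLoopP]
  | succ m ih =>
    intro k saw hk hm
    by_cases hend : seq.length ≤ k
    · rw [PySem.List.pyRange_one_eq_nil (by exact_mod_cast hend)]
      rw [List.drop_eq_nil_of_le hend]
      simp [pvLoopA, pvLoopP]
    · have hkl : k < seq.length := by omega
      have hk1 : k - 1 < seq.length := by omega
      have hdropk : seq.drop (k - 1 + 1) = seq.drop k := by congr 1; omega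
      have e2 : seq.drop k = seq[k] :: seq.drop (k + 1) := List.drop_eq_getElem_cons hkl
      have e1 : seq.drop (k - 1) = seq[k - 1] :: seq.drop k := by
        rw [List.drop_eq_getElem_cons hk1, hdropk]
      have hga : PySem.List.pyGetD seq (k : Int) 0 = seq[k] := by
        rw [PySem.List.pyGetD_natCast, List.getD_eq_getElem seq 0 hkl]
      have hgb : PySem.List.pyGetD seq ((k : Int) - 1) 0 = seq[k - 1] := by
        have hcast : ((k : Int) - 1) = ((k - 1 : Nat) : Int) := by omega
        rw [hcast, PySem.List.pyGetD_natCast, List.getD_eq_getElem seq 0 hk1]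
      have hzip : (seq.drop (k - 1)).zip (seq.drop k) =
          (seq[k - 1], seq[k]) :: ((seq.drop k).zip (seq.drop (k + 1))) := by
        rw [e1]
        conv_lhs => rw [e2]
        rw [List.zip_cons_cons, ← e2]
      have hrec : ∀ s, pvLoopA seq (PySem.List.pyRange ((k : Int) + 1) (seq.length : Int) 1) s =
          pvLoopP ((seq.drop k).zip (seq.drop (k + 1))) s := by
        intro s
        have h := ih (k + 1) s (by omega) (by omega)
        rw [show ((k + 1 : Nat) : Int) = (k : Int) + 1 by push_cast; ring] at h
        rw [show (k + 1) - 1 = k by omega] at h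
        exact h
      rw [PySem.List.pyRange_one_cons (by exact_mod_cast hkl)]
      rw [pvLoopA, hga, hgb, hzip, pvLoopP]
      by_cases hgt : seq[k] > seq[k - 1]
      · rw [if_pos hgt, if_pos hgt]
        exact hrec true
      · rw [if_neg hgt, if_neg hgt]
        by_cases hc : (decide (seq[k] < seq[k - 1]) && saw) = true
        · rw [if_pos hc, if_pos hc]
        · rw [if_neg hc, if_neg hc]
          exact hrec saw

-- B in terms of the named pipeline
theorem alt_eq (seq : List Int) :
    objectives_oscillate_py_alt seq = pvAdj (pvMoves (seq.zip (seq.drop 1))) := rfl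

-- B returns false on sequences shorter than 3
theorem alt_short (seq : List Int) (h : seq.length < 3) :
    objectives_oscillate_py_alt seq = false := by
  rw [alt_eq]
  apply pvAdj_short
  calc (pvMoves (seq.zip (seq.drop 1))).length
      ≤ ((seq.zip (seq.drop 1)).map
          (fun p => (if p.2 > p.1 then (1 : Int) else 0) - (if p.2 < p.1 then 1 else 0))).length :=
        List.length_filter_le _ _
    _ ≤ 1 := by simp [List.length_zip]; omega

-- ===== VERDICT (by name: the statement is the Claim_ definition above) =====
theorem objectives_oscillate_py_spec : Claim_equal_objectives_oscillate_py := by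
  intro seq _
  unfold Spec_objectives_oscillate_py objectives_oscillate_py
  by_cases h3 : (seq.length : Int) < 3
  · rw [if_pos h3, alt_short seq (by exact_mod_cast h3)]
  · rw [if_neg h3, alt_eq]
    have h := pvLoopA_eq_loopP seq seq.length 1 false (by omega) (by omega)
    rw [show ((1 : Nat) : Int) = 1 from rfl, show (1 : Nat) - 1 = 0 from rfl, List.drop_zero] at h
    rw [h, pvLoopP_false]
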